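-- pv_equiv track=rewrite | github.com/nehadevaraj/IOT653U-001-002 | CommuTech for 002/CommuTech - Beta.py | estimate_peak_fare_zone_based
-- ===== SOURCE A (Python) =====
-- def estimate_peak_fare_zone_based(origin_zones: list[int], dest_zones: list[int]) -> tuple[int, int]:
--     candidates = []
--     for oz in origin_zones:
--         for dz in dest_zones:
--             mn = min(oz, dz)
--             mx = max(oz, dz)
--             candidates.append((mx - mn, mn, mx))
--     if not candidates:
--         return (0, 0)
--     _, mn, mx = min(candidates, key=lambda t: t[0])
--     return mn, mx
-- ===== SOURCE B (Python) =====
-- def estimate_peak_fare_zone_based(origin_zones: list[int], dest_zones: list[int]) -> tuple[int, int]: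
--     if not origin_zones or not dest_zones:
--         return (0, 0)
--     so = sorted(origin_zones)
--     sd = sorted(dest_zones)
--     # two-pointer merge over the sorted lists: d becomes the minimum |oz - dz|
--     d = abs(so[0] - sd[0])
--     i = j = 0
--     while i < len(so) and j < len(sd):
--         diff = so[i] - sd[j]
--         if abs(diff) < d:
--             d = abs(diff)
--         if diff < 0:
--             i += 1
--         else:
--             j += 1
--     dest_set = set(dest_zones)
--     for oz in origin_zones:
--         if (oz - d) in dest_set or (oz + d) in dest_set:
--             for dz in dest_zones:
--                 if abs(oz - dz) == d:
--                     return (min(oz, dz), max(oz, dz))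
-- ===== Notes on version B (the rewrite author's own statement) =====
-- stated objective: faster
-- what changed: A enumerates all origin-dest pairs and takes min by difference; B sorts both lists, finds the minimum difference with a two-pointer merge, then reconstructs the first nested-loop pair via a set-membership scan.
import Mathlib
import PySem

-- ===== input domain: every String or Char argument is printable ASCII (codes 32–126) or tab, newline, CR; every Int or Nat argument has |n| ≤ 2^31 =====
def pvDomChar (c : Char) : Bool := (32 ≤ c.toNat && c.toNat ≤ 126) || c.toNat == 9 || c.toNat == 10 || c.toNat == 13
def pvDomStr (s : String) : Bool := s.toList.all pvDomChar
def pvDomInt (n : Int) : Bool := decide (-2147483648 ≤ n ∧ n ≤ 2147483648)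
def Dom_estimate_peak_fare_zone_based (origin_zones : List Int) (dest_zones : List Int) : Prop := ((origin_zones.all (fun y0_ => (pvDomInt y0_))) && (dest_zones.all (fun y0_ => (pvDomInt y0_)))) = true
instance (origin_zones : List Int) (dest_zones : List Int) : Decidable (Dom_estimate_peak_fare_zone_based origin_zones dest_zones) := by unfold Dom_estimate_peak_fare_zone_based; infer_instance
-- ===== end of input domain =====

-- B replaces A's exhaustive enumeration of all zone pairs by sort + two-pointer merge for the
-- minimum difference plus a linear reconstruction scan; objective: faster.

-- ===== PORT A =====
-- candidates.append((mx - mn, mn, mx)) over the nested loops, then min(candidates, key=lambda t: t[0])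
def estimate_peak_fare_zone_based (origin_zones : List Int) (dest_zones : List Int) : List Int :=
  let candidates : List (Int × Int × Int) :=
    origin_zones.foldl (fun acc oz =>
      dest_zones.foldl (fun acc dz =>
        acc ++ [(max oz dz - min oz dz, min oz dz, max oz dz)]) acc) []
  if candidates = [] then [0, 0]
  else
    match PySem.List.min? candidates (fun t => t.1) with
    | some t => [t.2.1, t.2.2]
    | none => []

-- ===== PORT B =====
-- the while-loop of Source B: two pointers consuming the sorted lists, d = running min |so[i] - sd[j]|
def pvMergeMinB : List Int → List Int → Int → Int
  | a :: as_, b :: bs, d =>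
    let diff := a - b
    let d' := if |diff| < d then |diff| else d
    if diff < 0 then pvMergeMinB as_ (b :: bs) d'
    else pvMergeMinB (a :: as_) bs d'
  | _, _, d => d
termination_by as_ bs _ => as_.length + bs.length

-- the final for-loop of Source B: first oz with a dest zone at distance d, then first such dz
def pvScanB (d : Int) (dest_zones : List Int) (destSet : PySem.Set Int) : List Int → List Int
  | [] => []
  | oz :: rest =>
    if PySem.Set.contains destSet (oz - d) || PySem.Set.contains destSet (oz + d) then
      match dest_zones.find? (fun dz => |oz - dz| == d) with
      | some dz => [min oz dz, max oz dz]
      | none => []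
    else pvScanB d dest_zones destSet rest

def estimate_peak_fare_zone_based_alt (origin_zones : List Int) (dest_zones : List Int) : List Int :=
  if origin_zones.isEmpty || dest_zones.isEmpty then [0, 0]
  else
    let so := PySem.List.sorted origin_zones (fun x => x) false
    let sd := PySem.List.sorted dest_zones (fun x => x) false
    let d := pvMergeMinB so sd |so.headD 0 - sd.headD 0|
    pvScanB d dest_zones (PySem.Set.ofList dest_zones) origin_zones

-- ===== PRECONDITION & SPEC =====
def Spec_estimate_peak_fare_zone_based (origin_zones : List Int) (dest_zones : List Int) (out : List Int) : Prop := out = estimate_peak_fare_zone_based_alt origin_zones dest_zones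
instance (origin_zones : List Int) (dest_zones : List Int) (out : List Int) : Decidable (Spec_estimate_peak_fare_zone_based origin_zones dest_zones out) := by unfold Spec_estimate_peak_fare_zone_based; infer_instance

-- ===== CLAIM (what is proved, stated in full; the proofs are below) =====
def Claim_equal_estimate_peak_fare_zone_based : Prop := ∀ (origin_zones : List Int) (dest_zones : List Int), Dom_estimate_peak_fare_zone_based origin_zones dest_zones → Spec_estimate_peak_fare_zone_based origin_zones dest_zones (estimate_peak_fare_zone_based origin_zones dest_zones)

-- ===== LEMMAS AND PROOFS =====

theorem pvMergeMinB_cons (a b d : Int) (as_ bs : List Int) :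
    pvMergeMinB (a :: as_) (b :: bs) d =
      (if a - b < 0 then pvMergeMinB as_ (b :: bs) (if |a - b| < d then |a - b| else d)
       else pvMergeMinB (a :: as_) bs (if |a - b| < d then |a - b| else d)) := by
  rw [pvMergeMinB]

theorem pvMergeMinB_nil (x y : List Int) (d : Int) (h : x = [] ∨ y = []) :
    pvMergeMinB x y d = d := by
  rcases h with h | h <;> subst h
  · rw [pvMergeMinB]
    intro a as_ b bs h1 h2; cases h1
  · rcases x with _ | ⟨a, as_⟩
    · rw [pvMergeMinB]; intro a as_ b bs h1 h2; cases h1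
    · rw [pvMergeMinB]; intro a as_ b bs h1 h2; cases h2

-- the merged minimum never exceeds its initial value
theorem pvMergeMin_le_init (as_ bs : List Int) (d0 : Int) : pvMergeMinB as_ bs d0 ≤ d0 := by
  induction as_, bs, d0 using pvMergeMinB.induct with
  | case1 a as_ b bs d diff d2 hlt ih =>
    have e : (if |a - b| < d then |a - b| else d) = d2 := rfl
    rw [pvMergeMinB_cons, if_pos hlt, e]
    refine le_trans ih ?_
    simp only [d2, diff]; split <;> omega
  | case2 a as_ b bs d diff d2 hlt ih =>
    have e : (if |a - b| < d then |a - b| else d) = d2 := rfl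
    rw [pvMergeMinB_cons, if_neg hlt, e]
    refine le_trans ih ?_
    simp only [d2, diff]; split <;> omega
  | case3 x y d h =>
    rcases x with _ | ⟨a, as_⟩
    · rw [pvMergeMinB_nil _ _ _ (Or.inl rfl)]
    · rcases y with _ | ⟨b, bs⟩
      · rw [pvMergeMinB_nil _ _ _ (Or.inr rfl)]
      · exact absurd (h a as_ b bs rfl rfl) (fun f => f)

-- the merged minimum is the initial value or an attained |a - b|
theorem pvMergeMin_shape (as_ bs : List Int) (d0 : Int) :
    pvMergeMinB as_ bs d0 = d0 ∨ ∃ a ∈ as_, ∃ b ∈ bs, pvMergeMinB as_ bs d0 = |a - b| := by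
  induction as_, bs, d0 using pvMergeMinB.induct with
  | case1 a as_ b bs d diff d2 hlt ih =>
    have e : (if |a - b| < d then |a - b| else d) = d2 := rfl
    rw [pvMergeMinB_cons, if_pos hlt, e]
    rcases ih with h | ⟨a', ha', b', hb', h⟩
    · rw [h]; simp only [d2, diff]; split
      · right; exact ⟨a, by simp, b, by simp, rfl⟩
      · left; rfl
    · right; exact ⟨a', by simp [ha'], b', hb', h⟩
  | case2 a as_ b bs d diff d2 hlt ih =>
    have e : (if |a - b| < d then |a - b| else d) = d2 := rfl
    rw [pvMergeMinB_cons, if_neg hlt, e]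
    rcases ih with h | ⟨a', ha', b', hb', h⟩
    · rw [h]; simp only [d2, diff]; split
      · right; exact ⟨a, by simp, b, by simp, rfl⟩
      · left; rfl
    · right; exact ⟨a', ha', b', by simp [hb'], h⟩
  | case3 x y d h =>
    rcases x with _ | ⟨a, as_⟩
    · left; rw [pvMergeMinB_nil _ _ _ (Or.inl rfl)]
    · rcases y with _ | ⟨b, bs⟩
      · left; rw [pvMergeMinB_nil _ _ _ (Or.inr rfl)]
      · exact absurd (h a as_ b bs rfl rfl) (fun f => f)

-- on sorted inputs the merged minimum is a lower bound for every pair difference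
theorem pvMergeMin_le (as_ bs : List Int) (d0 : Int)
    (ha : as_.Pairwise (· ≤ ·)) (hb : bs.Pairwise (· ≤ ·)) :
    ∀ a ∈ as_, ∀ b ∈ bs, pvMergeMinB as_ bs d0 ≤ |a - b| := by
  induction as_, bs, d0 using pvMergeMinB.induct with
  | case1 a as_ b bs d diff d2 hlt ih =>
    intro a' ha' b' hb'
    have e : (if |a - b| < d then |a - b| else d) = d2 := rfl
    rw [pvMergeMinB_cons, if_pos hlt, e]
    rcases List.mem_cons.mp ha' with rfl | ha'
    · have hbb : b ≤ b' := by
        rcases List.mem_cons.mp hb' with rfl | hb'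
        · exact le_rfl
        · exact (List.pairwise_cons.mp hb).1 _ hb'
      have habs : |a' - b| = -(a' - b) := abs_of_neg hlt
      have h1 : d2 ≤ |a' - b| := by simp only [d2, diff]; split <;> omega
      have h2 : |a' - b'| = -(a' - b') := abs_of_neg (by omega)
      refine le_trans (pvMergeMin_le_init _ _ _) ?_
      omega
    · exact ih (List.pairwise_cons.mp ha).2 hb a' ha' b' hb'
  | case2 a as_ b bs d diff d2 hlt ih =>
    intro a' ha' b' hb'
    have e : (if |a - b| < d then |a - b| else d) = d2 := rfl
    rw [pvMergeMinB_cons, if_neg hlt, e]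
    rcases List.mem_cons.mp hb' with rfl | hb'
    · have haa : a ≤ a' := by
        rcases List.mem_cons.mp ha' with rfl | ha'
        · exact le_rfl
        · exact (List.pairwise_cons.mp ha).1 _ ha'
      push_neg at hlt
      have habs : |a - b'| = a - b' := abs_of_nonneg (by omega)
      have h1 : d2 ≤ |a - b'| := by simp only [d2, diff]; split <;> omega
      have h2 : |a' - b'| = a' - b' := abs_of_nonneg (by omega)
      refine le_trans (pvMergeMin_le_init _ _ _) ?_
      omega
    · exact ih ha (List.pairwise_cons.mp hb).2 a' ha' b' hb'
  | case3 x y d h =>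
    rcases x with _ | ⟨a, as_⟩
    · intro a ha; cases ha
    · rcases y with _ | ⟨b, bs⟩
      · intro a _ b hb; cases hb
      · exact absurd (h a as_ b bs rfl rfl) (fun f => f)

-- Python min(xs, key) = first element whose key equals the minimum key: fold helper
theorem pvFoldMin_eq {α : Type} (key : α → Int) (M : Int) (xs : List α) (m : α)
    (hmin : ∀ x ∈ xs, M ≤ key x) (hMm : M ≤ key m)
    (hmem : M = key m ∨ M ∈ xs.map key) :
    xs.foldl (fun acc x =>
      match acc with
      | none => some x
      | some m => if key x < key m then some x else some m) (some m)
    = if key m = M then some m else xs.find? (fun x => key x == M) := by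
  induction xs generalizing m with
  | nil =>
    simp only [List.foldl_nil, List.find?_nil]
    rcases hmem with h | h
    · rw [if_pos h.symm]
    · cases h
  | cons x xs ih =>
    simp only [List.foldl_cons]
    by_cases hm : key m = M
    · have hx : ¬ key x < key m := by
        have := hmin x (by simp); omega
      rw [if_neg hx, if_pos hm]
      have := ih m (fun y hy => hmin y (by simp [hy])) hMm (Or.inl hm.symm)
      rw [if_pos hm] at this; exact this
    · rw [if_neg hm]
      by_cases hx : key x = M
      · have hlt : key x < key m := by
          have := hmin x (by simp); omega
        rw [if_pos hlt]
        have := ih x (fun y hy => hmin y (by simp [hy])) (hmin x (by simp)) (Or.inl hx.symm)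
        rw [if_pos hx] at this
        rw [this, List.find?_cons_of_pos (by simp [hx])]
      · rw [List.find?_cons_of_neg (by simp [hx])]
        have hmemx : M ∈ xs.map key := by
          rcases hmem with h | h
          · exact absurd h.symm hm
          · simp only [List.map_cons, List.mem_cons] at h
            rcases h with h | h
            · exact absurd h.symm hx
            · exact h
        split <;> rename_i hcond
        · have := ih x (fun y hy => hmin y (by simp [hy])) (hmin x (by simp)) (Or.inr hmemx)
          rwa [if_neg hx] at this
        · have := ih m (fun y hy => hmin y (by simp [hy])) hMm (Or.inr hmemx)
          rwa [if_neg hm] at this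

theorem pvMin?_eq_find? {α : Type} (key : α → Int) (M : Int) (xs : List α)
    (hmin : ∀ x ∈ xs, M ≤ key x) (hmem : M ∈ xs.map key) :
    PySem.List.min? xs key = xs.find? (fun x => key x == M) := by
  cases xs with
  | nil => cases hmem
  | cons x xs =>
    simp only [PySem.List.min?, List.foldl_cons]
    by_cases hx : key x = M
    · have h := pvFoldMin_eq key M xs x (fun y hy => hmin y (by simp [hy])) (hmin x (by simp)) (Or.inl hx.symm)
      rw [if_pos hx] at h
      rw [List.find?_cons_of_pos (by simp [hx])]
      exact h
    · have hmemx : M ∈ xs.map key := by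
        simp only [List.map_cons, List.mem_cons] at hmem
        rcases hmem with h | h
        · exact absurd h.symm hx
        · exact h
      have h := pvFoldMin_eq key M xs x (fun y hy => hmin y (by simp [hy])) (hmin x (by simp)) (Or.inr hmemx)
      rw [if_neg hx] at h
      rw [List.find?_cons_of_neg (by simp [hx])]
      exact h

theorem pvFind?_flatMap {α β : Type} (p : β → Bool) (f : α → List β) (l : List α) :
    (l.flatMap f).find? p
      = (l.find? (fun a => ((f a).find? p).isSome)).bind (fun a => (f a).find? p) := by
  induction l with
  | nil => simp
  | cons x l ih =>
    rw [List.flatMap_cons, List.find?_append, ih]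
    by_cases hx : ((f x).find? p).isSome
    · rw [List.find?_cons_of_pos (by simpa using hx)]
      obtain ⟨v, hv⟩ := Option.isSome_iff_exists.mp hx
      simp [hv]
    · rw [List.find?_cons_of_neg (by simpa using hx)]
      have : (f x).find? p = none := Option.not_isSome_iff_eq_none.mp hx
      simp [this]

-- the reconstruction scan is a find? over origin followed by a find? over dest
theorem pvScanB_eq (d : Int) (dest : List Int) (s : PySem.Set Int) (o : List Int) :
    pvScanB d dest s o
      = match o.find? (fun oz => PySem.Set.contains s (oz - d) || PySem.Set.contains s (oz + d)) with
        | some oz =>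
          match dest.find? (fun dz => |oz - dz| == d) with
          | some dz => [min oz dz, max oz dz]
          | none => []
        | none => [] := by
  induction o with
  | nil => rfl
  | cons oz rest ih =>
    by_cases h : (PySem.Set.contains s (oz - d) || PySem.Set.contains s (oz + d)) = true
    · have hfind : List.find? (fun oz => PySem.Set.contains s (oz - d) || PySem.Set.contains s (oz + d)) (oz :: rest) = some oz := List.find?_cons_of_pos h
      rw [pvScanB, if_pos h, hfind]
    · rw [pvScanB, if_neg h, List.find?_cons_of_neg (by simpa using h), ih]

-- the membership guard of B is exactly "dest has a zone at distance d"
theorem pvGuard_iff (dest : List Int) (oz d : Int) (hd : 0 ≤ d) :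
    (PySem.Set.contains (PySem.Set.ofList dest) (oz - d) || PySem.Set.contains (PySem.Set.ofList dest) (oz + d))
      = ((dest.find? (fun dz => |oz - dz| == d)).isSome) := by
  have habs : ∀ z : Int, (|oz - z| = d) ↔ (z = oz - d ∨ z = oz + d) := by
    intro z
    rcases abs_cases (oz - z) with ⟨h1, h2⟩ | ⟨h1, h2⟩ <;> omega
  have hc : ∀ z : Int, PySem.Set.contains (PySem.Set.ofList dest) z = decide (z ∈ dest) := by
    intro z
    simp [PySem.Set.contains, PySem.Set.mem_ofList]
  rw [hc, hc]
  by_cases h1 : oz - d ∈ dest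
  · have : (dest.find? (fun dz => |oz - dz| == d)).isSome := by
      rw [List.find?_isSome]
      exact ⟨oz - d, h1, by simp only [beq_iff_eq]; exact (habs _).mpr (Or.inl rfl)⟩
    simp [h1, this]
  · by_cases h2 : oz + d ∈ dest
    · have : (dest.find? (fun dz => |oz - dz| == d)).isSome := by
        rw [List.find?_isSome]
        exact ⟨oz + d, h2, by simp only [beq_iff_eq]; exact (habs _).mpr (Or.inr rfl)⟩
      simp [h2, this]
    · have : ¬ (dest.find? (fun dz => |oz - dz| == d)).isSome := by
        rw [List.find?_isSome]
        rintro ⟨z, hz, hpz⟩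
        simp only [beq_iff_eq] at hpz
        rcases (habs z).mp hpz with rfl | rfl <;> simp_all
      simp [h1, h2, this]

theorem pvMaxMin (a b : Int) : max a b - min a b = |a - b| := by
  rcases abs_cases (a - b) with ⟨h1, h2⟩ | ⟨h1, h2⟩ <;> rcases le_total a b with h | h <;>
    simp only [max_def, min_def] <;> split <;> omega

-- ===== VERDICT (by name: the statement is the Claim_ definition above) =====
theorem estimate_peak_fare_zone_based_spec : Claim_equal_estimate_peak_fare_zone_based := by
  intro o d _
  unfold Spec_estimate_peak_fare_zone_based
  by_cases ho : o = []
  · subst ho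
    simp [estimate_peak_fare_zone_based, estimate_peak_fare_zone_based_alt]
  by_cases hd : d = []
  · subst hd
    simp [estimate_peak_fare_zone_based, estimate_peak_fare_zone_based_alt]
  -- both lists nonempty
  have hso_ne : PySem.List.sorted o (fun x => x) false ≠ [] := by
    rw [Ne, PySem.List.sorted_eq_nil_iff]; exact ho
  have hsd_ne : PySem.List.sorted d (fun x => x) false ≠ [] := by
    rw [Ne, PySem.List.sorted_eq_nil_iff]; exact hd
  obtain ⟨a, so', hso⟩ := List.exists_cons_of_ne_nil hso_ne
  obtain ⟨b, sd', hsd⟩ := List.exists_cons_of_ne_nil hsd_ne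
  set so := PySem.List.sorted o (fun x => x) false with hso_def
  set sd := PySem.List.sorted d (fun x => x) false with hsd_def
  set M := pvMergeMinB so sd |so.headD 0 - sd.headD 0| with hM_def
  have hpo : so.Pairwise (· ≤ ·) := PySem.List.sorted_pairwise o (fun x => x)
  have hpd : sd.Pairwise (· ≤ ·) := PySem.List.sorted_pairwise d (fun x => x)
  have hmo : ∀ x, x ∈ o ↔ x ∈ so := fun x => ((PySem.List.sorted_perm o (fun x => x) false).mem_iff).symm
  have hmd : ∀ x, x ∈ d ↔ x ∈ sd := fun x => ((PySem.List.sorted_perm d (fun x => x) false).mem_iff).symm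
  have hmin : ∀ x ∈ o, ∀ y ∈ d, M ≤ |x - y| := fun x hx y hy =>
    pvMergeMin_le so sd _ hpo hpd x ((hmo x).mp hx) y ((hmd y).mp hy)
  have hex : ∃ x ∈ o, ∃ y ∈ d, M = |x - y| := by
    rcases pvMergeMin_shape so sd |so.headD 0 - sd.headD 0| with h | ⟨x, hx, y, hy, h⟩
    · refine ⟨a, (hmo a).mpr (by rw [hso]; exact List.mem_cons_self), b,
        (hmd b).mpr (by rw [hsd]; exact List.mem_cons_self), ?_⟩
      rw [hM_def, h, hso, hsd]; simp
    · exact ⟨x, (hmo x).mpr hx, y, (hmd y).mpr hy, h⟩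
  have hM0 : 0 ≤ M := by
    obtain ⟨x, _, y, _, h⟩ := hex
    rw [h]; exact abs_nonneg _
  have hA : estimate_peak_fare_zone_based o d
      = match o.find? (fun oz => (d.find? (fun dz => |oz - dz| == M)).isSome) with
        | some oz =>
          match d.find? (fun dz => |oz - dz| == M) with
          | some dz => [min oz dz, max oz dz]
          | none => []
        | none => [] := by
    unfold estimate_peak_fare_zone_based
    simp only [PySem.List.foldl_append_singleton_eq_map, PySem.List.foldl_append_eq_flatMap,
      List.nil_append]
    set cands := o.flatMap (fun oz => d.map (fun dz => (max oz dz - min oz dz, min oz dz, max oz dz))) with hcands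
    have hne : cands ≠ [] := by
      obtain ⟨x, hx, y, hy, _⟩ := hex
      intro hnil
      have hmemc : (max x y - min x y, min x y, max x y) ∈ cands := by
        rw [hcands]
        simp only [List.mem_flatMap, List.mem_map]
        exact ⟨x, hx, y, hy, rfl⟩
      rw [hnil] at hmemc; cases hmemc
    rw [if_neg hne]
    have hmin' : ∀ t ∈ cands, M ≤ t.1 := by
      intro t ht
      rw [hcands] at ht
      simp only [List.mem_flatMap, List.mem_map] at ht
      obtain ⟨x, hx, y, hy, rfl⟩ := ht
      simpa [pvMaxMin] using hmin x hx y hy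
    have hmem' : M ∈ cands.map (fun t => t.1) := by
      obtain ⟨x, hx, y, hy, h⟩ := hex
      rw [hcands]
      simp only [List.mem_map, List.mem_flatMap]
      exact ⟨(max x y - min x y, min x y, max x y), ⟨x, hx, ⟨y, hy, rfl⟩⟩, by rw [pvMaxMin]; exact h.symm⟩
    rw [pvMin?_eq_find? _ M cands hmin' hmem', hcands, pvFind?_flatMap]
    simp only [List.find?_map, Option.isSome_map, Function.comp_def, pvMaxMin]
    rcases h1 : o.find? (fun oz => (d.find? (fun dz => |oz - dz| == M)).isSome) with _ | oz
    · simp only [Option.bind_none]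
    · simp only [Option.bind_some]
      rcases h2 : d.find? (fun dz => |oz - dz| == M) with _ | dz
      · rfl
      · rfl
  have hB : estimate_peak_fare_zone_based_alt o d
      = match o.find? (fun oz => (d.find? (fun dz => |oz - dz| == M)).isSome) with
        | some oz =>
          match d.find? (fun dz => |oz - dz| == M) with
          | some dz => [min oz dz, max oz dz]
          | none => []
        | none => [] := by
    unfold estimate_peak_fare_zone_based_alt
    rw [if_neg (by simp [List.isEmpty_iff, ho, hd])]
    show pvScanB M d (PySem.Set.ofList d) o = _
    rw [pvScanB_eq]
    have hg : (fun oz => PySem.Set.contains (PySem.Set.ofList d) (oz - M) || PySem.Set.contains (PySem.Set.ofList d) (oz + M))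
        = (fun oz => (d.find? (fun dz => |oz - dz| == M)).isSome) :=
      funext fun oz => pvGuard_iff d oz M hM0
    rw [hg]
  rw [hA, hB]
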